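-- pv_equiv track=rewrite | github.com/bitwisecook/tcl-lsp | core/irule_test/bridge.py | _tcl_quote
-- ===== SOURCE A (Python) =====
-- def _tcl_quote(value: str) -> str:
--     """Brace-quote a value for safe Tcl eval.
--
--     If the value contains unbalanced braces, fall back to
--     backslash-escaping special characters.
--     """
--     # Fast path: if braces are balanced, brace-quoting is safe
--     depth = 0
--     for ch in value:
--         if ch == "{":
--             depth += 1
--         elif ch == "}":
--             depth -= 1
--             if depth < 0:
--                 break
--     if depth == 0:
--         return "{" + value + "}"
--     # Fallback: backslash-escape Tcl special chars
--     escaped = value.replace("\\", "\\\\")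
--     for ch in ('"', "$", "[", "]", "{", "}", ";"):
--         escaped = escaped.replace(ch, f"\\{ch}")
--     return escaped
-- ===== SOURCE B (Python) =====
-- def _braces_balanced(value: str) -> bool:
--     depth = 0
--     for ch in value:
--         depth += (ch == "{") - (ch == "}")
--         if depth < 0:
--             return False
--     return depth == 0
--
--
-- def _tcl_quote(value: str) -> str:
--     """Brace-quote a value for safe Tcl eval.
--
--     If the value contains unbalanced braces, fall back to
--     backslash-escaping special characters in one pass.
--     """
--     if _braces_balanced(value):
--         return "{" + value + "}"
--     return "".join("\\" + ch if ch in '\\"$[]{};' else ch for ch in value)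
-- ===== Notes on version B (the rewrite author's own statement) =====
-- stated objective: simpler
-- what changed: The balance check becomes a boolean helper with an arithmetic depth update, and the fallback's eight sequential full-string replace passes are replaced by a single pass that emits each character, backslash-prefixed when special, and joins the result.
import Mathlib
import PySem

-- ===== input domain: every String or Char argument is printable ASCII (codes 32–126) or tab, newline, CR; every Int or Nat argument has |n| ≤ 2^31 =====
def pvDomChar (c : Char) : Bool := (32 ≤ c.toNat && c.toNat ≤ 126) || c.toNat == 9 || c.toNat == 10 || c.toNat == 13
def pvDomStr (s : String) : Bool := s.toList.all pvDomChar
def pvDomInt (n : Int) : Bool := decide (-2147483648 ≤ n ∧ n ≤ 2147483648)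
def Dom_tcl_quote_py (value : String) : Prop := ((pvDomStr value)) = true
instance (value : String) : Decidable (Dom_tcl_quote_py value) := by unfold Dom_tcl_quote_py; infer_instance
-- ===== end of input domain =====

-- B replaces the depth loop by a boolean balance helper and the eight sequential replace passes
-- by a single escaping pass over the characters (objective: simpler — one scan, no intermediate strings).


-- ===== PORT A =====
-- A's depth loop: '{' increments, '}' decrements and breaks out as soon as depth goes negative;
-- the helper returns the depth the loop leaves behind.
def pvScanDepth : List Char → Int → Int
  | [], d => d
  | c :: t, d =>
    if c = '{' then pvScanDepth t (d + 1)
    else if c = '}' then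
      if d - 1 < 0 then d - 1 else pvScanDepth t (d - 1)
    else pvScanDepth t d

def tcl_quote_py (value : String) : String :=
  if pvScanDepth value.toList 0 = 0 then "{" ++ value ++ "}"
  else
    -- escaped = value.replace("\\", "\\\\"); then one replace per special char, in order
    let escaped := PySem.Str.replace value "\\" "\\\\"
    ["\"", "$", "[", "]", "{", "}", ";"].foldl
      (fun e ch => PySem.Str.replace e ch ("\\" ++ ch)) escaped

-- ===== PORT B =====
-- B's boolean helper: arithmetic depth update, early False on a negative depth, balanced iff depth ends at 0.
def pvBalGo : List Char → Int → Bool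
  | [], d => d == 0
  | c :: t, d =>
    let d' := d + (if c = '{' then 1 else 0) - (if c = '}' then 1 else 0)
    if d' < 0 then false else pvBalGo t d'

def tcl_quote_py_alt (value : String) : String :=
  if pvBalGo value.toList 0 then "{" ++ value ++ "}"
  else
    -- ''.join('\\' + ch if ch in '\\"$[]{};' else ch for ch in value)
    String.ofList (value.toList.flatMap
      (fun c => if "\\\"$[]{};".toList.contains c then ['\\', c] else [c]))

-- ===== PRECONDITION & SPEC =====
def Spec_tcl_quote_py (value : String) (out : String) : Prop := out = tcl_quote_py_alt value
instance (value : String) (out : String) : Decidable (Spec_tcl_quote_py value out) := by unfold Spec_tcl_quote_py; infer_instance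

-- ===== CLAIM (what is proved, stated in full; the proofs are below) =====
def Claim_equal_tcl_quote_py : Prop := ∀ (value : String), Dom_tcl_quote_py value → Spec_tcl_quote_py value (tcl_quote_py value)

-- ===== LEMMAS AND PROOFS =====

-- A's left-behind depth is 0 exactly when B's helper says balanced (for nonnegative running depth).
theorem pvScan_eq_bal (l : List Char) : ∀ d : Int, 0 ≤ d →
    ((pvScanDepth l d = 0) ↔ pvBalGo l d = true) := by
  induction l with
  | nil => intro d _; simp [pvScanDepth, pvBalGo]
  | cons c t ih =>
    intro d hd
    by_cases h1 : c = '{'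
    · subst h1
      have e1 : pvScanDepth ('{' :: t) d = pvScanDepth t (d + 1) := by simp [pvScanDepth]
      have e2 : pvBalGo ('{' :: t) d = pvBalGo t (d + 1) := by
        show (if d + 1 - 0 < 0 then false else pvBalGo t (d + 1 - 0)) = _
        rw [if_neg (by omega : ¬ (d + (1:Int) - 0 < 0))]
        norm_num
      rw [e1, e2]; exact ih (d + 1) (by omega)
    · by_cases h2 : c = '}'
      · subst h2
        by_cases h3 : d - 1 < 0
        · have e1 : pvScanDepth ('}' :: t) d = d - 1 := by simp [pvScanDepth, h3]
          have e2 : pvBalGo ('}' :: t) d = false := by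
            show (if d + 0 - 1 < 0 then false else pvBalGo t (d + 0 - 1)) = _
            rw [if_pos (by omega : d + (0:Int) - 1 < 0)]
          rw [e1, e2]; simp; omega
        · have e1 : pvScanDepth ('}' :: t) d = pvScanDepth t (d - 1) := by
            simp [pvScanDepth, h3]
          have e2 : pvBalGo ('}' :: t) d = pvBalGo t (d - 1) := by
            show (if d + 0 - 1 < 0 then false else pvBalGo t (d + 0 - 1)) = _
            rw [if_neg (by omega : ¬ (d + (0:Int) - 1 < 0))]
            norm_num
          rw [e1, e2]; exact ih (d - 1) (by omega)
      · have e1 : pvScanDepth (c :: t) d = pvScanDepth t d := by simp [pvScanDepth, h1, h2]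
        have e2 : pvBalGo (c :: t) d = pvBalGo t d := by
          show (if d + (if c = '{' then 1 else 0) - (if c = '}' then 1 else 0) < 0 then false
                else pvBalGo t (d + (if c = '{' then 1 else 0) - (if c = '}' then 1 else 0))) = _
          rw [if_neg h1, if_neg h2, if_neg (by omega : ¬ (d + (0:Int) - 0 < 0))]
          norm_num
        rw [e1, e2]; exact ih d hd

-- single-character replace is a per-character expansion
theorem pvReplaceGo_single (c : Char) (new : List Char) : ∀ (fuel : Nat) (l acc : List Char),
    l.length ≤ fuel →
    PySem.Chars.replace.go [c] new fuel l acc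
      = acc.reverse ++ l.flatMap (fun y => if y = c then new else [y]) := by
  intro fuel
  induction fuel with
  | zero => intro l acc h; simp at h; simp [h, PySem.Chars.replace.go]
  | succ n ih =>
    intro l acc h
    cases l with
    | nil => simp [PySem.Chars.replace.go]
    | cons x t =>
      simp [PySem.Chars.replace.go, List.isPrefixOf]
      by_cases hx : x = c
      · simp [hx, ih t _ (by simpa using h)]
      · simp [hx, Ne.symm hx, ih t _ (by simpa using h)]

theorem pvReplace_single (l : List Char) (c : Char) (new : List Char) :
    PySem.Chars.replace l [c] new = l.flatMap (fun y => if y = c then new else [y]) := by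
  simpa [PySem.Chars.replace] using pvReplaceGo_single c new l.length l [] le_rfl

-- escaping with respect to a set of already-handled special characters
def pvEsc (S : List Char) (x : Char) : List Char := if S.contains x then ['\\', x] else [x]

theorem pvChain (l : List Char) (S : List Char) (c : Char) (hc : c ≠ '\\') (hcS : c ∉ S) :
    (l.flatMap (pvEsc S)).flatMap (fun y => if y = c then ['\\', c] else [y])
      = l.flatMap (pvEsc (c :: S)) := by
  rw [List.flatMap_assoc]
  apply List.flatMap_congr
  intro x _
  by_cases hxS : x ∈ S
  · have hxc : x ≠ c := fun h => hcS (h ▸ hxS)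
    simp [pvEsc, hxS, Ne.symm hc, hxc]
  · by_cases hxc : x = c
    · simp [pvEsc, hxS, hxc, hcS]
    · simp [pvEsc, hxS, hxc]

set_option maxHeartbeats 1000000 in
theorem tcl_quote_py_spec' (value : String) :
    tcl_quote_py value = tcl_quote_py_alt value := by
  unfold tcl_quote_py tcl_quote_py_alt
  by_cases hb : pvBalGo value.toList 0 = true
  · rw [if_pos ((pvScan_eq_bal value.toList 0 le_rfl).mpr hb), if_pos hb]
  · rw [if_neg (fun h => hb ((pvScan_eq_bal value.toList 0 le_rfl).mp h)), if_neg hb]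
    simp only [List.foldl, PySem.Str.replace]
    refine congrArg String.ofList ?_
    simp only [PySem.Str.toList_replace, String.toList_ofList]
    have hT : ∀ (s : String), ("\\" ++ s).toList = '\\' :: s.toList := by
      intro s; simp
    rw [show ("\\" : String).toList = ['\\'] from rfl,
        show ("\\\\" : String).toList = ['\\', '\\'] from rfl]
    rw [show (PySem.Chars.replace value.toList ['\\'] ['\\', '\\'])
          = value.toList.flatMap (pvEsc ['\\']) by
        rw [pvReplace_single]; apply List.flatMap_congr; intro x _
        by_cases hx : x = '\\' <;> simp [pvEsc, hx]]
    rw [hT, hT, hT, hT, hT, hT, hT]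
    rw [show ("\"" : String).toList = ['"'] from rfl, show ("$" : String).toList = ['$'] from rfl,
        show ("[" : String).toList = ['['] from rfl, show ("]" : String).toList = [']'] from rfl,
        show ("{" : String).toList = ['{'] from rfl, show ("}" : String).toList = ['}'] from rfl,
        show (";" : String).toList = [';'] from rfl]
    simp only [pvReplace_single]
    rw [pvChain _ _ '\"' (by decide) (by decide)]
    rw [pvChain _ _ '$' (by decide) (by decide)]
    rw [pvChain _ _ '[' (by decide) (by decide)]
    rw [pvChain _ _ ']' (by decide) (by decide)]
    rw [pvChain _ _ '{' (by decide) (by decide)]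
    rw [pvChain _ _ '}' (by decide) (by decide)]
    rw [pvChain _ _ ';' (by decide) (by decide)]
    apply List.flatMap_congr
    intro x _
    simp only [pvEsc]
    have hmem : ([';', '}', '{', ']', '[', '$', '\"', '\\'].contains x)
        = ("\\\"$[]{};".toList.contains x) := by
      rw [show "\\\"$[]{};".toList = ['\\', '\"', '$', '[', ']', '{', '}', ';'] from rfl]
      simp only [List.contains_eq_mem, List.mem_cons, List.not_mem_nil]
      exact decide_eq_decide.mpr (by tauto)
    rw [hmem]

-- ===== VERDICT (by name: the statement is the Claim_ definition above) =====
theorem tcl_quote_py_spec : Claim_equal_tcl_quote_py := by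
  intro value _
  unfold Spec_tcl_quote_py
  exact tcl_quote_py_spec' value
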